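-- pv_equiv track=rewrite | github.com/MKuranowski/pyroutelib3 | pyroutelib3/osmparsing.py | getWayAllowed
-- ===== SOURCE A (Python) =====
-- from typing import Container, Mapping, Sequence, Tuple, List
--
-- def getWayAllowed(way: dict, access_tags: Sequence[str]) -> bool:
--     """Checks if this way is restricted by access tags."""
--     allowed = True
--
--     for tag in access_tags:
--         value = way["tag"].get(tag)
--         if value is not None:
--             if value == "no" or value == "private":
--                 allowed = False
--             else:
--                 allowed = True
--
--     return allowed
-- ===== SOURCE B (Python) =====
-- def getWayAllowed(way: dict, access_tags) -> bool:
--     """Checks if this way is restricted by access tags."""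
--     for tag in reversed(access_tags):
--         value = way["tag"].get(tag)
--         if value is not None:
--             return value not in ("no", "private")
--     return True
-- ===== Notes on version B (the rewrite author's own statement) =====
-- stated objective: simpler
-- what changed: Replaces the stateful overwrite loop (last present tag wins via repeated reassignment of 'allowed') by an early-exit scan of reversed(access_tags) that returns on the first present value, defaulting to True.
import Mathlib
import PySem

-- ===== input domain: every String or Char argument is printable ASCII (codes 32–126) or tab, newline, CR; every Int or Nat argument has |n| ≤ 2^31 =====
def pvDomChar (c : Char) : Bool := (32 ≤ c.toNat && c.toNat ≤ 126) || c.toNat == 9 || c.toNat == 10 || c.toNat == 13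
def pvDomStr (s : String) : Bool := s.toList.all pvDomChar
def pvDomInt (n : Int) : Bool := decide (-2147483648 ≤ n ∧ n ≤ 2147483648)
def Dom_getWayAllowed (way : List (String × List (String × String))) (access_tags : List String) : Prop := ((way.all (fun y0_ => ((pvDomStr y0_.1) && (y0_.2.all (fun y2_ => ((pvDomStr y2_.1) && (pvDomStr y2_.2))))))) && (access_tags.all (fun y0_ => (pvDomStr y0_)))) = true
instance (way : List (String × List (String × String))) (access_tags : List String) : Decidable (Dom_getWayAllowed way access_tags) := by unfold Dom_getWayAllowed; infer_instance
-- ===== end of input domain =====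

-- B replaces A's stateful last-wins overwrite loop by an early-exit scan of the
-- reversed tag list (objective: simpler).

-- ===== PORT A =====
-- A: allowed starts True; each present tag overwrites it ("no"/"private" → False, else True).
def getWayAllowed (way : List (String × List (String × String))) (access_tags : List String) : Bool :=
  access_tags.foldl (fun allowed tag =>
    match PySem.Dict.get? (PySem.Dict.mk ((PySem.Dict.get? (PySem.Dict.mk way) "tag").getD [])) tag with
    | none => allowed
    | some value => if value == "no" || value == "private" then false else true) true

-- ===== PORT B =====
-- B: walk the reversed tag list; the first present value decides; fall through to true.
def getWayAllowedAltLoop (td : PySem.Dict String String) : List String → Bool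
  | [] => true
  | tag :: rest =>
    match PySem.Dict.get? td tag with
    | some value => !(value == "no" || value == "private")
    | none => getWayAllowedAltLoop td rest

def getWayAllowed_alt (way : List (String × List (String × String))) (access_tags : List String) : Bool :=
  getWayAllowedAltLoop (PySem.Dict.mk ((PySem.Dict.get? (PySem.Dict.mk way) "tag").getD [])) access_tags.reverse

-- ===== PRECONDITION & SPEC =====
-- Pre_ excludes exactly the inputs where Python A raises KeyError: a nonempty
-- access_tags with no "tag" key in way (B raises there too).
def Pre_getWayAllowed (way : List (String × List (String × String))) (access_tags : List String) : Prop :=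
  access_tags = [] ∨ (PySem.Dict.get? (PySem.Dict.mk way) "tag").isSome = true
instance (way : List (String × List (String × String))) (access_tags : List String) : Decidable (Pre_getWayAllowed way access_tags) := by unfold Pre_getWayAllowed; infer_instance

def pvWitness_getWayAllowed : (List (String × List (String × String))) × List String :=
  ([("tag", [("foot", "yes")])], ["foot", "car"])

def Spec_getWayAllowed (way : List (String × List (String × String))) (access_tags : List String) (out : Bool) : Prop := out = getWayAllowed_alt way access_tags
instance (way : List (String × List (String × String))) (access_tags : List String) (out : Bool) : Decidable (Spec_getWayAllowed way access_tags out) := by unfold Spec_getWayAllowed; infer_instance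

-- ===== CLAIM (what is proved, stated in full; the proofs are below) =====
def Claim_equal_getWayAllowed : Prop := ∀ (way : List (String × List (String × String))) (access_tags : List String), Dom_getWayAllowed way access_tags → Pre_getWayAllowed way access_tags → Spec_getWayAllowed way access_tags (getWayAllowed way access_tags)

-- ===== LEMMAS AND PROOFS =====

-- The reversed early-exit loop with default b, generalized over the fallthrough value.
def altLoopAux (td : PySem.Dict String String) (b : Bool) : List String → Bool
  | [] => b
  | tag :: rest =>
    match PySem.Dict.get? td tag with
    | some value => !(value == "no" || value == "private")
    | none => altLoopAux td b rest

theorem altLoopAux_append (td : PySem.Dict String String) (b : Bool) (l : List String) (x : String) :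
    altLoopAux td b (l ++ [x]) =
      altLoopAux td (match PySem.Dict.get? td x with
        | none => b
        | some value => if value == "no" || value == "private" then false else true) l := by
  induction l with
  | nil =>
    simp [altLoopAux]
    cases PySem.Dict.get? td x with
    | none => rfl
    | some v => cases h1 : v == "no" <;> cases h2 : v == "private" <;> simp_all
  | cons y ys ih =>
    simp [altLoopAux]
    cases PySem.Dict.get? td y with
    | none => simpa using ih
    | some v => rfl

theorem foldl_eq_altLoopAux (td : PySem.Dict String String) (l : List String) (b : Bool) :
    l.foldl (fun allowed tag =>
      match PySem.Dict.get? td tag with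
      | none => allowed
      | some value => if value == "no" || value == "private" then false else true) b
    = altLoopAux td b l.reverse := by
  induction l generalizing b with
  | nil => rfl
  | cons x xs ih =>
    simp only [List.foldl_cons, List.reverse_cons]
    rw [ih, altLoopAux_append]

theorem altLoop_eq_aux (td : PySem.Dict String String) (l : List String) :
    getWayAllowedAltLoop td l = altLoopAux td true l := by
  induction l with
  | nil => rfl
  | cons x xs ih =>
    simp only [getWayAllowedAltLoop, altLoopAux]
    cases PySem.Dict.get? td x with
    | none => exact ih
    | some v => cases h1 : v == "no" <;> cases h2 : v == "private" <;> simp_all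

-- ===== VERDICT (by name: the statement is the Claim_ definition above) =====
theorem getWayAllowed_spec : Claim_equal_getWayAllowed := by
  intro way access_tags _ _
  unfold Spec_getWayAllowed getWayAllowed getWayAllowed_alt
  rw [foldl_eq_altLoopAux, altLoop_eq_aux]
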